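-- pv_equiv track=rewrite | github.com/oleglk/Interview | CODE/LC01/lc0029__divide_two_integers.py | divide_two_integers
-- ===== SOURCE A (Python) =====
-- def divide_two_integers(dividend: int, divisor: int) -> int:
--     if ( divisor == 1 ):
--         return dividend
--     if ( divisor == 0 ):
--         raise Exception("Zero division")
--     isPositive = True if ( ((dividend >= 0) and (divisor >= 0)) or ((dividend < 0) and (divisor < 0)) )  else False
--
--     # handle overflow case
--     INT_MIN = -2**31
--     INT_MAX = 2**31 - 1
--     if ( (dividend == INT_MIN) and (divisor == -1) ):
--         return INT_MAX  # quotient would be strictly greater than 2^31 - 1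
--
--     # convert both numbers to negative to support -2^31
--     if ( dividend > 0 ):        dividend = -dividend
--     if ( divisor > 0 ):         divisor  = -divisor
--
--     # (further comparisons are inverted since we work with negative numbers)
--     quotient = 0
--     while ( dividend <= divisor ):
--         # find max 2^x * divisor that could be subtracted from current dividend
--         currDivisor = divisor
--         currQuotient = 1  # how many times divisor can be subtracted
--         # checking (currDivisor >= -2^30) prevents divisor overflow
--         while ( (currDivisor >= -2^30) and (dividend <= (currDivisor << 1)) ):
--             currDivisor <<= 1   # multiply by 2
--             currQuotient <<= 1  # multiply by 2
--         # now currDivisor is the max 2^x * divisor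
--         # update dividend and quotient
--         dividend -= currDivisor   # (subtracting negative from negative)
--         quotient += currQuotient  # quotient is maintained positive
--
--     # restore the sign
--     if ( not isPositive ):
--         quotient = -quotient
--     return quotient
-- ===== SOURCE B (Python) =====
-- def divide_two_integers(dividend: int, divisor: int) -> int:
--     if divisor == 1:
--         return dividend
--     if divisor == 0:
--         raise Exception("Zero division")
--     if dividend == -2**31 and divisor == -1:
--         return 2**31 - 1  # clamp, as the problem statement requires
--     q = abs(dividend) // abs(divisor)
--     return -q if (dividend < 0) != (divisor < 0) else q
-- ===== Notes on version B (the rewrite author's own statement) =====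
-- stated objective: simpler
-- what changed: Replaces the nested negative-number bit-shift doubling loops with a single closed-form expression q = abs(dividend)//abs(divisor) plus a sign flip; the three guards (divisor==1, zero-division raise, INT_MIN/-1 clamp) stay.
import Mathlib
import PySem

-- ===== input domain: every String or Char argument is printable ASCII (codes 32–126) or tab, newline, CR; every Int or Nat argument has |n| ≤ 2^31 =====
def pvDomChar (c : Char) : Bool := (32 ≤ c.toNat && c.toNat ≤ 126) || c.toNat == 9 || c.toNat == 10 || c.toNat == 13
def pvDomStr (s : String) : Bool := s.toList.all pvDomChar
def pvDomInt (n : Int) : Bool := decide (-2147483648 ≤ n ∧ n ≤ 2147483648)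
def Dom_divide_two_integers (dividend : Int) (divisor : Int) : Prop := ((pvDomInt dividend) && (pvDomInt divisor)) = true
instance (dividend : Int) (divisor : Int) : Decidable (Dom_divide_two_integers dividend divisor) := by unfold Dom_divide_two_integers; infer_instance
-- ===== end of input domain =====

-- B replaces A's nested doubling-subtraction loops by one closed-form |dividend|//|divisor| with a sign flip (simpler).

-- ===== PORT A =====
-- inner while loop of A; fuel only makes it total (for the divisors A reaches, ≤ -1,
-- at most 6 doublings ever happen, so fuel 64 never runs out on A's actual calls).
-- Python's `-2^30` is `(-2) xor 30 = -32` (^ is xor, unary minus binds tighter), ported literally as -32.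
def dtiInner (fuel : Nat) (dividend currDivisor currQuotient : Int) : Int × Int :=
  match fuel with
  | 0 => (currDivisor, currQuotient)
  | fuel + 1 =>
    if currDivisor ≥ -32 ∧ dividend ≤ currDivisor * 2 then
      dtiInner fuel dividend (currDivisor * 2) (currQuotient * 2)
    else (currDivisor, currQuotient)

-- outer while loop of A; fuel only makes it total (A passes fuel (divisor-dividend).toNat+1,
-- which always suffices since each iteration increases dividend by at least 1).
def dtiOuter (fuel : Nat) (dividend divisor quotient : Int) : Int :=
  match fuel with
  | 0 => quotient
  | fuel + 1 =>
    if dividend ≤ divisor then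
      let r := dtiInner 64 dividend divisor 1
      dtiOuter fuel (dividend - r.1) divisor (quotient + r.2)
    else quotient

def divide_two_integers (dividend : Int) (divisor : Int) : Int :=
  if divisor = 1 then dividend
  else if divisor = 0 then 0  -- Python raises Exception here; excluded by Pre_
  else
    let isPositive : Bool := decide ((dividend ≥ 0 ∧ divisor ≥ 0) ∨ (dividend < 0 ∧ divisor < 0))
    if dividend = -2^31 ∧ divisor = -1 then 2^31 - 1
    else
      let d := if dividend > 0 then -dividend else dividend
      let v := if divisor > 0 then -divisor else divisor
      let quotient := dtiOuter ((v - d).toNat + 1) d v 0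
      if isPositive then quotient else -quotient

-- ===== PORT B =====
def divide_two_integers_alt (dividend : Int) (divisor : Int) : Int :=
  if divisor = 1 then dividend
  else if divisor = 0 then 0  -- Python raises Exception here; excluded by Pre_
  else if dividend = -2^31 ∧ divisor = -1 then 2^31 - 1
  else
    let q : Int := ((dividend.natAbs / divisor.natAbs : Nat) : Int)
    if decide (dividend < 0) != decide (divisor < 0) then -q else q

-- ===== PRECONDITION & SPEC =====
-- Pre_ excludes exactly divisor = 0, where the Python A raises Exception("Zero division").
def Pre_divide_two_integers (dividend : Int) (divisor : Int) : Prop := divisor ≠ 0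
instance (dividend : Int) (divisor : Int) : Decidable (Pre_divide_two_integers dividend divisor) := by
  unfold Pre_divide_two_integers; infer_instance

def pvWitness_divide_two_integers : Int × Int := (7, 2)

def Spec_divide_two_integers (dividend : Int) (divisor : Int) (out : Int) : Prop := out = divide_two_integers_alt dividend divisor
instance (dividend : Int) (divisor : Int) (out : Int) : Decidable (Spec_divide_two_integers dividend divisor out) := by unfold Spec_divide_two_integers; infer_instance

-- ===== CLAIM (what is proved, stated in full; the proofs are below) =====
def Claim_equal_divide_two_integers : Prop := ∀ (dividend : Int) (divisor : Int), Dom_divide_two_integers dividend divisor → Pre_divide_two_integers dividend divisor → Spec_divide_two_integers dividend divisor (divide_two_integers dividend divisor)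

-- ===== LEMMAS AND PROOFS =====

-- Invariant of the inner loop: from a state with currDivisor = v * currQuotient,
-- dividend ≤ currDivisor, 1 ≤ currQuotient, every exit state satisfies the same.
theorem dtiInner_inv (fuel : Nat) (dividend v currDivisor currQuotient : Int)
    (hcd : currDivisor = v * currQuotient) (hle : dividend ≤ currDivisor) (hq : 1 ≤ currQuotient) :
    (dtiInner fuel dividend currDivisor currQuotient).1 = v * (dtiInner fuel dividend currDivisor currQuotient).2 ∧
    dividend ≤ (dtiInner fuel dividend currDivisor currQuotient).1 ∧
    1 ≤ (dtiInner fuel dividend currDivisor currQuotient).2 := by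
  induction fuel generalizing currDivisor currQuotient with
  | zero => exact ⟨hcd, hle, hq⟩
  | succ n ih =>
    simp only [dtiInner]
    split
    · next h =>
      exact ih (currDivisor * 2) (currQuotient * 2) (by rw [hcd]; ring) h.2 (by omega)
    · exact ⟨hcd, hle, hq⟩

-- If the loop guard fails, the outer loop returns the accumulator whatever the fuel.
theorem dtiOuter_stop (fuel : Nat) (dividend divisor quotient : Int) (h : ¬ dividend ≤ divisor) :
    dtiOuter fuel dividend divisor quotient = quotient := by
  cases fuel with
  | zero => rfl
  | succ n => simp [dtiOuter, h]

-- Main loop lemma: for nonpositive dividend and divisor ≤ -1, with enough fuel, the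
-- outer loop adds |dividend| / |divisor| to the accumulator.
theorem dtiOuter_eq (fuel : Nat) (dividend divisor quotient : Int)
    (hv : divisor ≤ -1) (hd : dividend ≤ 0) (hfuel : (divisor - dividend).toNat < fuel) :
    dtiOuter fuel dividend divisor quotient = quotient + ((dividend.natAbs / divisor.natAbs : Nat) : Int) := by
  induction fuel generalizing dividend quotient with
  | zero => omega
  | succ n ih =>
    simp only [dtiOuter]
    split
    · next hle =>
      obtain ⟨h1, h2, h3⟩ := dtiInner_inv 64 dividend divisor divisor 1 (by ring) hle (le_refl 1)
      set r := dtiInner 64 dividend divisor 1 with hr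
      have hr1v : r.1 ≤ divisor := by
        calc r.1 = divisor * r.2 := h1
        _ ≤ divisor * 1 := mul_le_mul_of_nonpos_left h3 (by omega)
        _ = divisor := by ring
      -- name k := r.2 as a Nat, and express everything through divisor.natAbs * k
      obtain ⟨k, hk, hk1⟩ : ∃ k : Nat, (r.2 : Int) = (k : Int) ∧ 1 ≤ k := ⟨r.2.toNat, by omega, by omega⟩
      have hr1k : r.1 = divisor * (k : Int) := by rw [h1, hk]
      have hcast : ((divisor.natAbs * k : Nat) : Int) = -(divisor * (k : Int)) := by
        push_cast
        rw [abs_of_nonpos (by omega : divisor ≤ 0)]; ring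
      have hmul_le : divisor.natAbs * k ≤ dividend.natAbs := by omega
      by_cases hnew : dividend - r.1 ≤ divisor
      · -- loop continues: recurse
        have hrec := ih (dividend - r.1) (quotient + r.2) (by omega) (by omega)
        rw [hrec]
        have hsub : (dividend - r.1).natAbs = dividend.natAbs - divisor.natAbs * k := by omega
        have hdiv : (dividend - r.1).natAbs / divisor.natAbs = dividend.natAbs / divisor.natAbs - k := by
          rw [hsub, Nat.sub_mul_div]
        have hkle : k ≤ dividend.natAbs / divisor.natAbs :=
          (Nat.le_div_iff_mul_le (by omega)).2 (by rw [Nat.mul_comm]; exact hmul_le)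
        rw [hdiv, Nat.cast_sub hkle, hk]
        ring
      · -- loop ends after this chunk: the quotient is exactly k
        rw [dtiOuter_stop n _ _ _ hnew]
        have hlt : dividend.natAbs < divisor.natAbs * (k + 1) := by
          have : divisor.natAbs * (k + 1) = divisor.natAbs * k + divisor.natAbs := by ring
          omega
        have hdivk : dividend.natAbs / divisor.natAbs = k :=
          Nat.div_eq_of_lt_le (by rw [Nat.mul_comm]; exact hmul_le) (by rw [Nat.mul_comm]; exact hlt)
        rw [hdivk, hk]
    · next hgt =>
      have h0 : dividend.natAbs / divisor.natAbs = 0 := Nat.div_eq_of_lt (by omega)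
      simp [h0]

theorem dti_sign (dividend divisor : Int) (_hv : divisor ≠ 0) :
    decide ((dividend ≥ 0 ∧ divisor ≥ 0) ∨ (dividend < 0 ∧ divisor < 0)) =
    !(decide (dividend < 0) != decide (divisor < 0)) := by
  by_cases h1 : dividend < 0 <;> by_cases h2 : divisor < 0 <;> simp_all <;> omega

-- ===== VERDICT (by name: the statement is the Claim_ definition above) =====
theorem divide_two_integers_spec : Claim_equal_divide_two_integers := by
  intro dividend divisor _ hpre
  unfold Pre_divide_two_integers at hpre
  unfold Spec_divide_two_integers divide_two_integers divide_two_integers_alt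
  by_cases h1 : divisor = 1
  · simp [h1]
  · simp only [if_neg h1, if_neg hpre]
    by_cases h2 : dividend = -2^31 ∧ divisor = -1
    · simp [h2]
    · simp only [if_neg h2]
      set d := if dividend > 0 then -dividend else dividend with hd
      set v := if divisor > 0 then -divisor else divisor with hv
      have hd0 : d ≤ 0 := by rw [hd]; split <;> omega
      have hv1 : v ≤ -1 := by
        rw [hv]; split <;> omega
      have hdabs : d.natAbs = dividend.natAbs := by rw [hd]; split <;> simp
      have hvabs : v.natAbs = divisor.natAbs := by rw [hv]; split <;> simp
      have houter := dtiOuter_eq ((v - d).toNat + 1) d v 0 hv1 hd0 (by omega)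
      rw [houter, hdabs, hvabs, dti_sign dividend divisor hpre]
      by_cases hs : decide (dividend < 0) != decide (divisor < 0) <;> simp [hs]
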